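-- pv_equiv track=rewrite | github.com/msharpe248/bsat | examples/encodings/sudoku.py | decode_sudoku
-- ===== SOURCE A (Python) =====
-- from typing import List, Dict, Optional
--
-- def decode_sudoku(solution: Dict[str, bool], size: int = 9) -> List[List[int]]:
--     """
--     Decode SAT solution to Sudoku grid.
--
--     Args:
--         solution: SAT solution
--         size: Grid size
--
--     Returns:
--         2D list representing the solved Sudoku grid
--     """
--     grid = [[0 for _ in range(size)] for _ in range(size)]
--
--     for r in range(size):
--         for c in range(size):
--             for n in range(1, size + 1):
--                 var = f"x_{r}_{c}_{n}"
--                 if var in solution and solution[var]: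
--                     grid[r][c] = n
--                     break
--
--     return grid
-- ===== SOURCE B (Python) =====
-- def decode_sudoku(solution, size=9):
--     """Decode SAT solution to Sudoku grid: one sparse pass over the assignment
--     instead of enumerating the whole r x c x n variable space."""
--     grid = [[0] * size for _ in range(size)]
--     row_of = {str(i): i for i in range(size)}
--     num_of = {str(n): n for n in range(1, size + 1)}
--     for key, value in solution.items():
--         if not value:
--             continue
--         parts = key.split('_')
--         if len(parts) != 4 or parts[0] != 'x':
--             continue
--         r = row_of.get(parts[1])
--         c = row_of.get(parts[2])
--         n = num_of.get(parts[3])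
--         if r is None or c is None or n is None:
--             continue
--         cur = grid[r][c]
--         if cur == 0 or n < cur:
--             grid[r][c] = n
--     return grid
-- ===== Notes on version B (the rewrite author's own statement) =====
-- stated objective: faster
-- what changed: A enumerates all size^2*(size+1) candidate variable names and probes the assignment for each; B makes one sparse pass over the assignment's items, splitting each true key on '_', resolving the three fields through precomputed str(i)->i tables (which enforce canonical spelling and range), and keeping the smallest n per cell, which reproduces A's first-hit break.
import Mathlib
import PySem

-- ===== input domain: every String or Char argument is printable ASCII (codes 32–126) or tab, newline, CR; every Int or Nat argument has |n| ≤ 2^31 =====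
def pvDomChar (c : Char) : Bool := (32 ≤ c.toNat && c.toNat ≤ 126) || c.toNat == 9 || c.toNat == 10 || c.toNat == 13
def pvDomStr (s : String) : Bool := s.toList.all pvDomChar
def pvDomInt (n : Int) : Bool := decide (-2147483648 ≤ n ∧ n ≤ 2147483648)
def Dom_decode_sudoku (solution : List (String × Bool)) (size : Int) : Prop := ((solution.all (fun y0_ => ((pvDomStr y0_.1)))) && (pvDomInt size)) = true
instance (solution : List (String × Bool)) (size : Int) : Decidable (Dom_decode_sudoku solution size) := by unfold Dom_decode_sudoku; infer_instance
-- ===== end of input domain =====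

-- B replaces A's enumeration of the whole r×c×n variable space by one sparse pass
-- over the assignment's entries (objective: faster; the proof is about return values only).

-- ===== PORT A =====
-- `var in solution and solution[var]` on the dict-as-association-list: first binding wins
def pvLook (solution : List (String × Bool)) (k : String) : Bool :=
  match solution.find? (fun p => p.1 == k) with
  | some p => p.2
  | none => false

-- f"x_{r}_{c}_{n}" built character for character (str(int) = PySem.Int.toStr; exact)
def pvKey (r c n : Int) : String :=
  String.ofList ('x' :: '_' :: (PySem.Int.toStr r).toList ++ '_' :: (PySem.Int.toStr c).toList ++ '_' :: (PySem.Int.toStr n).toList)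

-- the n-loop with `break` is "first n in range(1, size+1) with a true binding" = find?;
-- `grid[r][c] = n` for c in range(size) is rendered as a modify of row r (r, c ≥ 0 come from range(size))
def pvRowLoop (solution : List (String × Bool)) (size r : Int) (row : List Int) : List Int :=
  (PySem.List.pyRange 0 size).foldl (fun row c =>
    match (PySem.List.pyRange 1 (size + 1)).find? (fun n => pvLook solution (pvKey r c n)) with
    | some n => row.set c.toNat n
    | none => row) row

def decode_sudoku (solution : List (String × Bool)) (size : Int) : List (List Int) :=
  (PySem.List.pyRange 0 size).foldl (fun grid r => grid.modify r.toNat (pvRowLoop solution size r))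
    ((PySem.List.pyRange 0 size).map (fun _ => (PySem.List.pyRange 0 size).map (fun _ => (0 : Int))))

-- ===== PORT B =====
-- {str(i): i for i in l} (dict comprehension = fold of insert)
def pvTable (l : List Int) : PySem.Dict String Int :=
  l.foldl (fun d i => d.insert (PySem.Int.toStr i) i) ⟨[]⟩

-- the body of B's for-loop (the chain of `continue`s, top to bottom)
def pvStep (row_of num_of : PySem.Dict String Int) (grid : List (List Int)) (kv : String × Bool) : List (List Int) :=
  if !kv.2 then grid
  else
    match PySem.Str.split? kv.1 "_" with
    | none => grid      -- unreachable: the separator "_" is non-empty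
    | some parts =>
      if parts.length ≠ 4 then grid
      else if parts.getD 0 "" ≠ "x" then grid
      else
        match row_of.get? (parts.getD 1 ""), row_of.get? (parts.getD 2 ""), num_of.get? (parts.getD 3 "") with
        | some r, some c, some n =>
          let cur := (grid.getD r.toNat []).getD c.toNat (0 : Int)
          if cur = 0 ∨ n < cur then grid.modify r.toNat (fun row => row.set c.toNat n) else grid
        | _, _, _ => grid

def decode_sudoku_alt (solution : List (String × Bool)) (size : Int) : List (List Int) :=
  -- grid = [[0]*size for _ in range(size)]; row_of/num_of are the two comprehension dicts
  solution.foldl (pvStep (pvTable (PySem.List.pyRange 0 size)) (pvTable (PySem.List.pyRange 1 (size + 1))))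
    ((PySem.List.pyRange 0 size).map (fun _ => List.replicate size.toNat (0 : Int)))

-- ===== PRECONDITION & SPEC =====
-- The Python argument is a dict, whose keys are necessarily distinct; an association list
-- with a duplicated key has no dict counterpart (first- vs last-binding is unspecifiable),
-- so such lists are excluded.
def Pre_decode_sudoku (solution : List (String × Bool)) (size : Int) : Prop :=
  (solution.map Prod.fst).Nodup
instance (solution : List (String × Bool)) (size : Int) : Decidable (Pre_decode_sudoku solution size) := by
  unfold Pre_decode_sudoku; infer_instance

def pvWitness_decode_sudoku : (List (String × Bool)) × Int :=
  ([("x_0_0_2", true), ("x_1_1_1", true), ("x_0_0_1", true)], 2)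

def Spec_decode_sudoku (solution : List (String × Bool)) (size : Int) (out : List (List Int)) : Prop := out = decode_sudoku_alt solution size
instance (solution : List (String × Bool)) (size : Int) (out : List (List Int)) : Decidable (Spec_decode_sudoku solution size out) := by unfold Spec_decode_sudoku; infer_instance

-- ===== CLAIM (what is proved, stated in full; the proofs are below) =====
def Claim_equal_decode_sudoku : Prop := ∀ (solution : List (String × Bool)) (size : Int), Dom_decode_sudoku solution size → Pre_decode_sudoku solution size → Spec_decode_sudoku solution size (decode_sudoku solution size)

-- ===== LEMMAS AND PROOFS =====

-- ---------- decimal digits of a natural number (Nat.toDigits 10) ----------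

def pvD (n : Nat) : List Char := Nat.toDigits 10 n

theorem pvD_core_acc : ∀ n f acc, n < f → Nat.toDigitsCore 10 f n acc = pvD n ++ acc := by
  intro n
  induction n using Nat.strong_induction_on with
  | _ n ih =>
    intro f acc hf
    obtain ⟨f', rfl⟩ : ∃ f', f = f' + 1 := ⟨f - 1, by omega⟩
    rw [Nat.toDigitsCore]
    by_cases h0 : n / 10 = 0
    · rw [if_pos h0]
      have h10 : n < 10 := by omega
      rw [show pvD n = [Nat.digitChar n] from ?_]
      · rw [Nat.mod_eq_of_lt h10]; rfl
      · unfold pvD Nat.toDigits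
        rw [Nat.toDigitsCore, if_pos h0, Nat.mod_eq_of_lt h10]
    · rw [if_neg h0]
      have hlt : n / 10 < n := Nat.div_lt_self (by omega) (by omega)
      rw [ih (n / 10) hlt f' _ (by omega)]
      have : pvD n = pvD (n / 10) ++ [Nat.digitChar (n % 10)] := by
        unfold pvD Nat.toDigits
        rw [Nat.toDigitsCore, if_neg h0]
        exact ih (n / 10) hlt n _ (by omega)
      rw [this, List.append_assoc]; rfl

theorem pvD_lt {n : Nat} (h : n < 10) : pvD n = [Nat.digitChar n] := by
  unfold pvD Nat.toDigits
  rw [Nat.toDigitsCore, if_pos (by omega : n / 10 = 0), Nat.mod_eq_of_lt h]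

theorem pvD_ge {n : Nat} (h : 10 ≤ n) : pvD n = pvD (n / 10) ++ [Nat.digitChar (n % 10)] := by
  unfold pvD Nat.toDigits
  rw [Nat.toDigitsCore, if_neg (by omega : ¬ n / 10 = 0)]
  exact pvD_core_acc (n / 10) n _ (by omega)

theorem digitChar_toNat {n : Nat} (h : n < 10) : (Nat.digitChar n).toNat = n + 48 := by
  interval_cases n <;> decide

theorem digitChar_ne_sep {n : Nat} (h : n < 10) : Nat.digitChar n ≠ '_' := by
  interval_cases n <;> decide

theorem pvD_no_sep (n : Nat) : '_' ∉ pvD n := by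
  induction n using Nat.strong_induction_on with
  | _ n ih =>
    by_cases h : n < 10
    · rw [pvD_lt h]
      intro hm
      exact digitChar_ne_sep h (List.mem_singleton.mp hm).symm
    · rw [pvD_ge (by omega)]
      intro hm
      rcases List.mem_append.mp hm with hm | hm
      · exact ih (n / 10) (Nat.div_lt_self (by omega) (by omega)) hm
      · exact digitChar_ne_sep (Nat.mod_lt _ (by omega)) (List.mem_singleton.mp hm).symm

def pvVal (l : List Char) : Nat := l.foldl (fun a c => 10 * a + (c.toNat - 48)) 0

theorem pvVal_pvD (n : Nat) : pvVal (pvD n) = n := by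
  induction n using Nat.strong_induction_on with
  | _ n ih =>
    by_cases h : n < 10
    · rw [pvD_lt h]
      simp [pvVal, digitChar_toNat h]
    · rw [pvD_ge (by omega)]
      have hm : n % 10 < 10 := Nat.mod_lt _ (by omega)
      simp only [pvVal, List.foldl_append, List.foldl_cons, List.foldl_nil]
      have := ih (n / 10) (Nat.div_lt_self (by omega) (by omega))
      simp only [pvVal] at this
      rw [this, digitChar_toNat hm]
      omega

theorem toList_toStr_nonneg {a : Int} (h : 0 ≤ a) :
    (PySem.Int.toStr a).toList = pvD a.toNat := by
  simp [PySem.Int.toStr, String.toList_ofList, PySem.Int.toChars, not_lt.mpr h, pvD]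

theorem toStr_inj_nonneg {a b : Int} (ha : 0 ≤ a) (hb : 0 ≤ b)
    (h : PySem.Int.toStr a = PySem.Int.toStr b) : a = b := by
  have h' := congrArg String.toList h
  rw [toList_toStr_nonneg ha, toList_toStr_nonneg hb] at h'
  have := congrArg pvVal h'
  rw [pvVal_pvD, pvVal_pvD] at this
  omega

theorem toStr_no_sep {a : Int} (h : 0 ≤ a) : '_' ∉ (PySem.Int.toStr a).toList := by
  rw [toList_toStr_nonneg h]
  exact pvD_no_sep _

-- ---------- split on '_' ----------

def pvSplit : List Char → List (List Char)
  | [] => [[]]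
  | c :: rest =>
    if c = '_' then [] :: pvSplit rest
    else
      match pvSplit rest with
      | [] => [[c]]
      | p :: ps => (c :: p) :: ps

def pvConsH (pre : List Char) : List (List Char) → List (List Char)
  | [] => [pre]
  | p :: ps => (pre ++ p) :: ps

theorem pvSplit_ne_nil (l : List Char) : pvSplit l ≠ [] := by
  cases l with
  | nil => simp [pvSplit]
  | cons c rest =>
    simp only [pvSplit]
    split
    · simp
    · split <;> simp

theorem pvGo_spec : ∀ (l : List Char) (f : Nat) (cur : List Char) (acc : List (List Char)),
    l.length < f →
    PySem.Chars.splitOn.go ['_'] f l cur acc = acc.reverse ++ pvConsH cur.reverse (pvSplit l) := by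
  intro l
  induction l with
  | nil =>
    intro f cur acc hf
    obtain ⟨f', rfl⟩ : ∃ f', f = f' + 1 := ⟨f - 1, by omega⟩
    rw [PySem.Chars.splitOn.go] <;> simp [pvSplit, pvConsH]
  | cons c rest ih =>
    intro f cur acc hf
    obtain ⟨f', rfl⟩ : ∃ f', f = f' + 1 := ⟨f - 1, by omega⟩
    rw [PySem.Chars.splitOn.go]
    by_cases hc : c = '_'
    · subst hc
      rw [if_pos (by simp [List.isPrefixOf])]
      have hd : List.drop (['_'] : List Char).length ('_' :: rest) = rest := rfl
      rw [hd, ih f' [] _ (by simp at hf ⊢; omega)]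
      obtain ⟨p, ps, hps⟩ : ∃ p ps, pvSplit rest = p :: ps := by
        cases h : pvSplit rest with
        | nil => exact absurd h (pvSplit_ne_nil rest)
        | cons p ps => exact ⟨p, ps, rfl⟩
      simp [pvSplit, hps, pvConsH]
    · rw [if_neg (by simp [List.isPrefixOf]; exact fun hh => hc hh.symm)]
      rw [ih f' (c :: cur) acc (by simp at hf ⊢; omega)]
      obtain ⟨p, ps, hps⟩ : ∃ p ps, pvSplit rest = p :: ps := by
        cases h : pvSplit rest with
        | nil => exact absurd h (pvSplit_ne_nil rest)
        | cons p ps => exact ⟨p, ps, rfl⟩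
      simp [pvSplit, hc, hps, pvConsH]

theorem splitOn_eq_pvSplit (l : List Char) : PySem.Chars.splitOn l ['_'] = pvSplit l := by
  unfold PySem.Chars.splitOn
  rw [pvGo_spec l (l.length + 1) [] [] (by omega)]
  obtain ⟨p, ps, hps⟩ : ∃ p ps, pvSplit l = p :: ps := by
    cases h : pvSplit l with
    | nil => exact absurd h (pvSplit_ne_nil l)
    | cons p ps => exact ⟨p, ps, rfl⟩
  simp [hps, pvConsH]

theorem pvSplit_no_sep {xs : List Char} (h : '_' ∉ xs) : pvSplit xs = [xs] := by
  induction xs with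
  | nil => rfl
  | cons c rest ih =>
    have hc : ¬ c = '_' := fun h => (by simp [h] at *)
    simp only [pvSplit, if_neg hc]
    rw [ih (fun hm => h (List.mem_cons_of_mem _ hm))]

theorem pvSplit_sep_append {xs : List Char} (ys : List Char) (h : '_' ∉ xs) :
    pvSplit (xs ++ '_' :: ys) = xs :: pvSplit ys := by
  induction xs with
  | nil => simp [pvSplit]
  | cons c rest ih =>
    have hc : ¬ c = '_' := fun hh => (by simp [hh] at h)
    simp only [List.cons_append, pvSplit, if_neg hc]
    rw [ih (fun hm => h (List.mem_cons_of_mem _ hm))]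

def pvJoin : List (List Char) → List Char
  | [] => []
  | [p] => p
  | p :: ps => p ++ '_' :: pvJoin ps

theorem pvJoin_pvSplit (l : List Char) : pvJoin (pvSplit l) = l := by
  induction l with
  | nil => rfl
  | cons c rest ih =>
    obtain ⟨p, ps, hps⟩ : ∃ p ps, pvSplit rest = p :: ps := by
      cases h : pvSplit rest with
      | nil => exact absurd h (pvSplit_ne_nil rest)
      | cons p ps => exact ⟨p, ps, rfl⟩
    by_cases hc : c = '_'
    · subst hc
      simp only [pvSplit, if_pos rfl, hps]
      rw [hps] at ih
      simp [pvJoin, ih]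
    · simp only [pvSplit, if_neg hc, hps]
      rw [hps] at ih
      cases ps with
      | nil => simp [pvJoin] at ih ⊢; rw [ih]
      | cons q t =>
        simp only [pvJoin] at ih ⊢
        rw [← ih]
        simp

-- ---------- the key bijection ----------

theorem pvKey_toList (r c n : Int) :
    (pvKey r c n).toList =
      'x' :: '_' :: (PySem.Int.toStr r).toList ++ '_' :: (PySem.Int.toStr c).toList ++ '_' :: (PySem.Int.toStr n).toList := by
  simp [pvKey, String.toList_ofList]

theorem pvSplit_key {r c n : Int} (hr : 0 ≤ r) (hc : 0 ≤ c) (hn : 0 ≤ n) :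
    pvSplit (pvKey r c n).toList =
      [['x'], (PySem.Int.toStr r).toList, (PySem.Int.toStr c).toList, (PySem.Int.toStr n).toList] := by
  rw [pvKey_toList]
  have h1 : ('x' :: '_' :: (PySem.Int.toStr r).toList) ++ '_' :: (PySem.Int.toStr c).toList ++ '_' :: (PySem.Int.toStr n).toList
      = ['x'] ++ '_' :: ((PySem.Int.toStr r).toList ++ '_' :: ((PySem.Int.toStr c).toList ++ '_' :: (PySem.Int.toStr n).toList)) := by
    simp
  rw [h1, pvSplit_sep_append _ (by decide), pvSplit_sep_append _ (toStr_no_sep hr),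
      pvSplit_sep_append _ (toStr_no_sep hc), pvSplit_no_sep (toStr_no_sep hn)]


-- ---------- pyRange facts ----------

theorem pyRange_eq_map (a b : Int) :
    PySem.List.pyRange a b = (List.range (b - a).toNat).map (fun i : Nat => a + Int.ofNat i) := by
  apply List.ext_getElem
  · simp [PySem.List.length_pyRange_one]
  · intro k h1 h2
    simp only [List.getElem_map, List.getElem_range]
    rw [PySem.List.getElem_pyRange_one]
    simp



-- ---------- the string→index tables ----------

theorem get?_empty (s : String) : (PySem.Dict.mk ([] : List (String × Int))).get? s = none := by
  rfl

theorem get?_pvTable {l : List Int} (hl : ∀ x ∈ l, 0 ≤ x) (s : String) (v : Int) :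
    (pvTable l).get? s = some v ↔ (v ∈ l ∧ PySem.Int.toStr v = s) := by
  induction l using List.reverseRecOn with
  | nil =>
    simp only [pvTable, List.foldl_nil, get?_empty, List.not_mem_nil, false_and]
    simp
  | append_singleton l a ih =>
    have hstep : pvTable (l ++ [a]) = (pvTable l).insert (PySem.Int.toStr a) a := by
      simp [pvTable, List.foldl_append]
    have ha : 0 ≤ a := hl a (by simp)
    rw [hstep, PySem.Dict.get?_insert]
    split_ifs with hs
    · constructor
      · intro h
        have hv : v = a := by injection h with h; omega
        subst hv
        exact ⟨by simp, hs.symm⟩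
      · rintro ⟨hv, hts⟩
        have : v = a := toStr_inj_nonneg (hl v hv) ha (by rw [hts, hs])
        rw [this]
    · rw [ih (fun x hx => hl x (List.mem_append_left _ hx))]
      constructor
      · rintro ⟨hv, hts⟩
        exact ⟨List.mem_append_left _ hv, hts⟩
      · rintro ⟨hv, hts⟩
        rcases List.mem_append.mp hv with hv | hv
        · exact ⟨hv, hts⟩
        · exfalso
          have : v = a := by simpa using hv
          exact hs (by rw [← hts, this])

-- ---------- B's hit analysis ----------

def pvHit (size : Int) (kv : String × Bool) : Option (Int × Int × Int) :=
  if !kv.2 then none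
  else
    match PySem.Str.split? kv.1 "_" with
    | none => none
    | some parts =>
      if parts.length ≠ 4 then none
      else if parts.getD 0 "" ≠ "x" then none
      else
        match (pvTable (PySem.List.pyRange 0 size)).get? (parts.getD 1 ""),
              (pvTable (PySem.List.pyRange 0 size)).get? (parts.getD 2 ""),
              (pvTable (PySem.List.pyRange 1 (size + 1))).get? (parts.getD 3 "") with
        | some r, some c, some n => some (r, c, n)
        | _, _, _ => none

theorem pvStep_eq (size : Int) (grid : List (List Int)) (kv : String × Bool) :
    pvStep (pvTable (PySem.List.pyRange 0 size)) (pvTable (PySem.List.pyRange 1 (size + 1))) grid kv =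
      (pvHit size kv).elim grid (fun rcn =>
        if (grid.getD rcn.1.toNat []).getD rcn.2.1.toNat (0 : Int) = 0 ∨
            rcn.2.2 < (grid.getD rcn.1.toNat []).getD rcn.2.1.toNat (0 : Int)
        then grid.modify rcn.1.toNat (fun row => row.set rcn.2.1.toNat rcn.2.2) else grid) := by
  obtain ⟨k, v⟩ := kv
  cases v
  · rfl
  · unfold pvStep pvHit
    rcases h : PySem.Str.split? k "_" with _ | parts <;> simp only [h, Bool.not_true]
    · rfl
    · split_ifs <;> try rfl
      all_goals rcases (pvTable (PySem.List.pyRange 0 size)).get? (parts.getD 1 "") with _ | r <;>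
        rcases (pvTable (PySem.List.pyRange 0 size)).get? (parts.getD 2 "") with _ | c <;>
          rcases (pvTable (PySem.List.pyRange 1 (size + 1))).get? (parts.getD 3 "") with _ | n <;>
            rfl

theorem pvHit_ranges {size : Int} {kv : String × Bool} {r c n : Int}
    (h : pvHit size kv = some (r, c, n)) :
    kv.2 = true ∧ r ∈ PySem.List.pyRange 0 size ∧ c ∈ PySem.List.pyRange 0 size ∧
      n ∈ PySem.List.pyRange 1 (size + 1) := by
  obtain ⟨k, v⟩ := kv
  unfold pvHit at h
  cases v
  · simp at h
  · refine ⟨rfl, ?_⟩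
    simp only [Bool.not_true] at h
    rcases hsp : PySem.Str.split? k "_" with _ | parts <;> rw [hsp] at h
    · simp at h
    · simp only [] at h
      split_ifs at h
      all_goals
        (rcases h1 : (pvTable (PySem.List.pyRange 0 size)).get? (parts.getD 1 "") with _ | r' <;>
           rcases h2 : (pvTable (PySem.List.pyRange 0 size)).get? (parts.getD 2 "") with _ | c' <;>
             rcases h3 : (pvTable (PySem.List.pyRange 1 (size + 1))).get? (parts.getD 3 "") with _ | n' <;>
               rw [h1, h2, h3] at h <;> try simp at h
         obtain ⟨rfl, rfl, rfl⟩ := h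
         refine ⟨((get?_pvTable (fun x hx => (PySem.List.mem_pyRange_one.mp hx).1) _ _).mp h1).1,
                 ((get?_pvTable (fun x hx => (PySem.List.mem_pyRange_one.mp hx).1) _ _).mp h2).1,
                 ((get?_pvTable (fun x hx => le_trans (by omega) (PySem.List.mem_pyRange_one.mp hx).1) _ _).mp h3).1⟩)

theorem toList_inj {s t : String} (h : s.toList = t.toList) : s = t := by
  rw [← String.ofList_toList (s := s), ← String.ofList_toList (s := t), h]

theorem split?_key {r c n : Int} (hr0 : 0 ≤ r) (hc0 : 0 ≤ c) (hn0 : 0 ≤ n) :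
    PySem.Str.split? (pvKey r c n) "_" =
      some ["x", PySem.Int.toStr r, PySem.Int.toStr c, PySem.Int.toStr n] := by
  have h1 := PySem.Str.split?_map (pvKey r c n) "_"
  have h2 : PySem.Chars.split? (pvKey r c n).toList "_".toList =
      some [['x'], (PySem.Int.toStr r).toList, (PySem.Int.toStr c).toList, (PySem.Int.toStr n).toList] := by
    have hsep : "_".toList = ['_'] := by decide
    rw [hsep]
    unfold PySem.Chars.split?
    rw [if_neg (by simp), splitOn_eq_pvSplit, pvSplit_key hr0 hc0 hn0]
  rw [h2] at h1
  cases hsp : PySem.Str.split? (pvKey r c n) "_" with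
  | none => rw [hsp] at h1; simp at h1
  | some ps =>
    rw [hsp] at h1
    simp only [Option.map_some, Option.some.injEq] at h1
    have htarget : [['x'], (PySem.Int.toStr r).toList, (PySem.Int.toStr c).toList, (PySem.Int.toStr n).toList] =
        List.map String.toList ["x", PySem.Int.toStr r, PySem.Int.toStr c, PySem.Int.toStr n] := by
      simp
    rw [htarget] at h1
    have hinj : Function.Injective String.toList := fun a b hab => toList_inj hab
    have hps := (List.map_injective_iff.mpr hinj) h1
    rw [hps]

theorem pvJoin_four (ps : List String) (h : ps.length = 4) :
    pvJoin (ps.map String.toList) =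
      (ps.getD 0 "").toList ++ '_' :: (ps.getD 1 "").toList ++ '_' :: (ps.getD 2 "").toList ++ '_' :: (ps.getD 3 "").toList := by
  match ps, h with
  | [a, b, c, d], _ => simp [pvJoin, List.getD]

-- the crux: a key hits (r, c, n) exactly when it IS the key A would build for (r, c, n)
theorem pvHit_iff {size : Int} {kv : String × Bool} {r c n : Int}
    (hr : r ∈ PySem.List.pyRange 0 size) (hc : c ∈ PySem.List.pyRange 0 size)
    (hn : n ∈ PySem.List.pyRange 1 (size + 1)) :
    pvHit size kv = some (r, c, n) ↔ (kv = (pvKey r c n, true)) := by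
  have hr0 : (0:Int) ≤ r := (PySem.List.mem_pyRange_one.mp hr).1
  have hc0 : (0:Int) ≤ c := (PySem.List.mem_pyRange_one.mp hc).1
  have hn0 : (0:Int) ≤ n := le_trans (by omega) (PySem.List.mem_pyRange_one.mp hn).1
  have hnn0 : ∀ x ∈ PySem.List.pyRange 0 size, (0:Int) ≤ x :=
    fun x hx => (PySem.List.mem_pyRange_one.mp hx).1
  have hnn1 : ∀ x ∈ PySem.List.pyRange 1 (size + 1), (0:Int) ≤ x :=
    fun x hx => le_trans (by omega) (PySem.List.mem_pyRange_one.mp hx).1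
  constructor
  · intro h
    obtain ⟨k, v⟩ := kv
    have hv : v = true := (pvHit_ranges h).1
    subst hv
    unfold pvHit at h
    simp only [Bool.not_true, Bool.false_eq_true, if_false] at h
    rcases hsp : PySem.Str.split? k "_" with _ | parts <;> rw [hsp] at h
    · simp at h
    · simp only [] at h
      split_ifs at h with hl4 hx0
      all_goals try exact Option.noConfusion h
      rcases h1 : (pvTable (PySem.List.pyRange 0 size)).get? (parts.getD 1 "") with _ | r' <;>
        rcases h2 : (pvTable (PySem.List.pyRange 0 size)).get? (parts.getD 2 "") with _ | c' <;>
          rcases h3 : (pvTable (PySem.List.pyRange 1 (size + 1))).get? (parts.getD 3 "") with _ | n' <;>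
            rw [h1, h2, h3] at h <;> try simp at h
      obtain ⟨hre, hce, hne⟩ := h
      rw [hre] at h1
      rw [hce] at h2
      rw [hne] at h3
      have e1 := ((get?_pvTable hnn0 _ _).mp h1).2
      have e2 := ((get?_pvTable hnn0 _ _).mp h2).2
      have e3 := ((get?_pvTable hnn1 _ _).mp h3).2
      have hx0' : parts.getD 0 "" = "x" := not_ne_iff.mp hx0
      have hl4' : parts.length = 4 := not_ne_iff.mp hl4
      -- reconstruct k from its split
      have hmap := PySem.Str.split?_map k "_"
      rw [hsp] at hmap
      have hsep : "_".toList = ['_'] := by decide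
      rw [hsep] at hmap
      unfold PySem.Chars.split? at hmap
      rw [if_neg (by simp), splitOn_eq_pvSplit] at hmap
      simp only [Option.map_some, Option.some.injEq] at hmap
      have hk : k.toList = pvJoin (parts.map String.toList) := by
        rw [hmap, pvJoin_pvSplit]
      rw [pvJoin_four parts hl4', hx0', ← e1, ← e2, ← e3] at hk
      have hkey : k = pvKey r c n := by
        apply toList_inj
        rw [hk, pvKey_toList]
        rfl
      rw [hkey]
  · intro h
    subst h
    unfold pvHit
    simp only [Bool.not_true]
    rw [split?_key hr0 hc0 hn0]
    have e1 : (pvTable (PySem.List.pyRange 0 size)).get? (PySem.Int.toStr r) = some r :=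
      (get?_pvTable hnn0 _ _).mpr ⟨hr, rfl⟩
    have e2 : (pvTable (PySem.List.pyRange 0 size)).get? (PySem.Int.toStr c) = some c :=
      (get?_pvTable hnn0 _ _).mpr ⟨hc, rfl⟩
    have e3 : (pvTable (PySem.List.pyRange 1 (size + 1))).get? (PySem.Int.toStr n) = some n :=
      (get?_pvTable hnn1 _ _).mpr ⟨hn, rfl⟩
    simp [List.getD, e1, e2, e3]

-- ---------- pyRange over 0..size as List.range ----------

theorem pyRange0 (b : Int) : PySem.List.pyRange 0 b = (List.range b.toNat).map Int.ofNat := by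
  rw [pyRange_eq_map]
  simp

theorem pv_toNat_ofNat (n : Nat) : (Int.ofNat n).toNat = n := rfl

theorem getD_map {α β : Type} (f : α → β) (l : List α) (i : Nat) (hi : i < l.length) (d : β) :
    (l.map f).getD i d = f l[i] := by
  rw [List.getD_eq_getElem?_getD, List.getElem?_map, List.getElem?_eq_getElem hi]
  rfl

theorem getD_replicate_zero (n j : Nat) : (List.replicate n (0:Int)).getD j 0 = 0 := by
  rw [List.getD_eq_getElem?_getD, List.getElem?_replicate]
  split_ifs <;> rfl

-- ---------- a generic cellwise description of an index-update fold ----------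

theorem fold_cellwise {α : Type} (step : List α → Nat → List α) (w : Nat → α → α)
    (hlen : ∀ xs c, (step xs c).length = xs.length)
    (hget : ∀ (xs : List α) (c i : Nat) (hi : i < xs.length) (hi2 : i < (step xs c).length),
      (step xs c)[i] = if c = i then w c xs[i] else xs[i]) :
    ∀ (j : Nat) (xs : List α), (((List.range j).foldl step xs).length = xs.length) ∧
      (∀ (i : Nat) (hi : i < xs.length) (hi2 : i < ((List.range j).foldl step xs).length),
        ((List.range j).foldl step xs)[i] = if i < j then w i xs[i] else xs[i]) := by
  intro j
  induction j with
  | zero => intro xs; simp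
  | succ j ih =>
    intro xs
    rw [List.range_succ, List.foldl_append, List.foldl_cons, List.foldl_nil]
    obtain ⟨ihl, ihg⟩ := ih xs
    refine ⟨by rw [hlen, ihl], ?_⟩
    intro i hi hi2
    have hiG : i < ((List.range j).foldl step xs).length := by rw [ihl]; exact hi
    rw [hget _ j i hiG (by rw [hlen]; exact hiG), ihg i hi hiG]
    by_cases hji : j = i
    · subst hji
      simp
    · have : ¬ i = j := fun hh => hji hh.symm
      split_ifs <;> (first | rfl | omega)

-- ---------- the per-cell value computed by A ----------

def aCell (solution : List (String × Bool)) (size r c : Int) : Int :=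
  ((PySem.List.pyRange 1 (size + 1)).find? (fun n => pvLook solution (pvKey r c n))).getD 0

theorem fold_cellwise_py {α : Type} (step : List α → Int → List α) (w : Nat → α → α)
    (hlen : ∀ xs c, (step xs c).length = xs.length)
    (hget : ∀ (xs : List α) (c i : Nat) (hi : i < xs.length) (hi2 : i < (step xs (Int.ofNat c)).length),
      (step xs (Int.ofNat c))[i] = if c = i then w c xs[i] else xs[i])
    (b : Int) (xs : List α) :
    (((PySem.List.pyRange 0 b).foldl step xs).length = xs.length) ∧
    (∀ (i : Nat) (hi : i < xs.length) (hi2 : i < ((PySem.List.pyRange 0 b).foldl step xs).length),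
      ((PySem.List.pyRange 0 b).foldl step xs)[i] = if i < b.toNat then w i xs[i] else xs[i]) := by
  rw [pyRange0 b, List.foldl_map]
  exact fold_cellwise (fun xs c => step xs (Int.ofNat c)) w (fun xs c => hlen xs _) hget b.toNat xs

theorem set_opt_len (xs : List Int) (o : Option Int) (c : Nat) :
    (match o with | some n => xs.set c n | none => xs).length = xs.length := by
  cases o <;> simp

theorem set_opt_get (xs : List Int) (o : Option Int) (c i : Nat) (hi : i < xs.length)
    (hi2 : i < (match o with | some n => xs.set c n | none => xs).length) :
    (match o with | some n => xs.set c n | none => xs)[i] =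
      if c = i then o.getD xs[i] else xs[i] := by
  cases o with
  | none => simp
  | some n => simp [List.getElem_set]

theorem rowLoop_eq (solution : List (String × Bool)) (size : Int) (r : Int) :
    pvRowLoop solution size r ((PySem.List.pyRange 0 size).map (fun _ => (0 : Int))) =
      (List.range size.toNat).map (fun j => aCell solution size r (Int.ofNat j)) := by
  unfold pvRowLoop
  obtain ⟨hl, hg⟩ := fold_cellwise_py
    (fun row c =>
      match (PySem.List.pyRange 1 (size + 1)).find? (fun n => pvLook solution (pvKey r c n)) with
      | some n => row.set c.toNat n
      | none => row)
    (fun j a =>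
      ((PySem.List.pyRange 1 (size + 1)).find? (fun n => pvLook solution (pvKey r (Int.ofNat j) n))).getD a)
    (fun xs c => set_opt_len xs _ c.toNat)
    (fun xs c i hi hi2 => by
      dsimp only [pv_toNat_ofNat]
      exact set_opt_get xs _ c i hi hi2)
    size ((PySem.List.pyRange 0 size).map (fun _ => (0 : Int)))
  apply List.ext_getElem
  · rw [hl]
    simp [PySem.List.length_pyRange_one]
  · intro j h1 h2
    have hj : j < size.toNat := by simpa using h2
    have hj0 : j < ((PySem.List.pyRange 0 size).map (fun _ => (0 : Int))).length := by
      simp [PySem.List.length_pyRange_one]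
      omega
    rw [hg j hj0 h1, if_pos hj]
    simp only [List.getElem_map, List.getElem_range]
    unfold aCell
    rfl

theorem A_shape (solution : List (String × Bool)) (size : Int) :
    decode_sudoku solution size =
      (List.range size.toNat).map (fun i =>
        (List.range size.toNat).map (fun j => aCell solution size (Int.ofNat i) (Int.ofNat j))) := by
  unfold decode_sudoku
  obtain ⟨hl, hg⟩ := fold_cellwise_py
    (fun grid r => grid.modify r.toNat (pvRowLoop solution size r))
    (fun i row => pvRowLoop solution size (Int.ofNat i) row)
    (fun xs c => by simp)
    (fun xs c i hi hi2 => by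
      rw [List.getElem_modify]
      simp only [pv_toNat_ofNat]
      rfl)
    size ((PySem.List.pyRange 0 size).map (fun _ => (PySem.List.pyRange 0 size).map (fun _ => (0 : Int))))
  apply List.ext_getElem
  · rw [hl]
    simp [PySem.List.length_pyRange_one]
  · intro i h1 h2
    have hi : i < size.toNat := by simpa using h2
    have hi0 : i < ((PySem.List.pyRange 0 size).map (fun _ => (PySem.List.pyRange 0 size).map (fun _ => (0 : Int)))).length := by
      simp [PySem.List.length_pyRange_one]
      omega
    rw [hg i hi0 h1, if_pos hi]
    simp only [List.getElem_map, List.getElem_range]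
    exact rowLoop_eq solution size (Int.ofNat i)

-- ---------- B: the fold updates each cell towards the minimum of its hits ----------

def pvCell (grid : List (List Int)) (i j : Nat) : Int := (grid.getD i []).getD j 0

def pvCellStep (size r c : Int) (cur : Int) (kv : String × Bool) : Int :=
  (pvHit size kv).elim cur (fun rcn =>
    if rcn.1 = r ∧ rcn.2.1 = c then (if cur = 0 ∨ rcn.2.2 < cur then rcn.2.2 else cur) else cur)

theorem getD_modify (l : List (List Int)) (a i : Nat) (f : List Int → List Int) :
    (l.modify a f).getD i [] = if a = i ∧ i < l.length then f (l.getD i []) else l.getD i [] := by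
  rcases lt_or_ge i l.length with hi | hi
  · have hi' : i < (l.modify a f).length := by simpa using hi
    rw [List.getD_eq_getElem _ _ hi', List.getD_eq_getElem _ _ hi, List.getElem_modify]
    by_cases ha : a = i
    · rw [if_pos ha, if_pos ⟨ha, hi⟩]
    · rw [if_neg ha, if_neg (by tauto)]
  · have h1 : l[i]? = none := List.getElem?_eq_none (by omega)
    have h2 : (l.modify a f)[i]? = none := List.getElem?_eq_none (by simpa using hi)
    rw [if_neg (by omega), List.getD_eq_getElem?_getD, List.getD_eq_getElem?_getD, h1, h2]

theorem getD_set (row : List Int) (b j : Nat) (x : Int) :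
    (row.set b x).getD j 0 = if b = j ∧ j < row.length then x else row.getD j 0 := by
  rcases lt_or_ge j row.length with hj | hj
  · have hj' : j < (row.set b x).length := by simpa using hj
    rw [List.getD_eq_getElem _ _ hj', List.getElem_set]
    by_cases hb : b = j
    · rw [if_pos hb, if_pos ⟨hb, hj⟩]
    · rw [if_neg hb, if_neg (by tauto), List.getD_eq_getElem _ _ hj]
  · have h1 : row[j]? = none := List.getElem?_eq_none (by omega)
    have h2 : (row.set b x)[j]? = none := List.getElem?_eq_none (by simpa using hj)
    rw [if_neg (by omega), List.getD_eq_getElem?_getD, List.getD_eq_getElem?_getD, h1, h2]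

theorem B_fold (size : Int) :
    ∀ (sol : List (String × Bool)) (grid : List (List Int)),
      grid.length = size.toNat →
      (∀ i, i < size.toNat → (grid.getD i []).length = size.toNat) →
      ((sol.foldl (pvStep (pvTable (PySem.List.pyRange 0 size)) (pvTable (PySem.List.pyRange 1 (size + 1)))) grid).length = size.toNat) ∧
      (∀ i, i < size.toNat →
        ((sol.foldl (pvStep (pvTable (PySem.List.pyRange 0 size)) (pvTable (PySem.List.pyRange 1 (size + 1)))) grid).getD i []).length = size.toNat) ∧
      (∀ i j, i < size.toNat → j < size.toNat →
        pvCell (sol.foldl (pvStep (pvTable (PySem.List.pyRange 0 size)) (pvTable (PySem.List.pyRange 1 (size + 1)))) grid) i j =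
          sol.foldl (pvCellStep size (Int.ofNat i) (Int.ofNat j)) (pvCell grid i j)) := by
  intro sol
  induction sol with
  | nil =>
    intro grid hlen hrow
    exact ⟨hlen, hrow, fun i j _ _ => rfl⟩
  | cons kv sol ih =>
    intro grid hlen hrow
    rw [List.foldl_cons, pvStep_eq]
    cases hh : pvHit size kv with
    | none =>
      rw [Option.elim_none]
      obtain ⟨a, b, c⟩ := ih grid hlen hrow
      refine ⟨a, b, ?_⟩
      intro i j hi hj
      rw [c i j hi hj, List.foldl_cons]
      have hst : pvCellStep size (Int.ofNat i) (Int.ofNat j) (pvCell grid i j) kv = pvCell grid i j := by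
        unfold pvCellStep
        rw [hh, Option.elim_none]
      rw [hst]
    | some rcn =>
      obtain ⟨r, c, n⟩ := rcn
      rw [Option.elim_some]
      dsimp only
      obtain ⟨hv, hrm, hcm, hnm⟩ := pvHit_ranges hh
      have hr0 : (0:Int) ≤ r := (PySem.List.mem_pyRange_one.mp hrm).1
      have hc0 : (0:Int) ≤ c := (PySem.List.mem_pyRange_one.mp hcm).1
      have hrlt : r.toNat < size.toNat := by
        have := (PySem.List.mem_pyRange_one.mp hrm).2
        omega
      have hclt : c.toNat < size.toNat := by
        have := (PySem.List.mem_pyRange_one.mp hcm).2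
        omega
      have hiff : ∀ i j : Nat, (r = Int.ofNat i ∧ c = Int.ofNat j) ↔ (r.toNat = i ∧ c.toNat = j) := by
        intro i j
        constructor
        · rintro ⟨rfl, rfl⟩
          exact ⟨rfl, rfl⟩
        · rintro ⟨h1, h2⟩
          subst h1
          subst h2
          constructor
          · exact (Int.toNat_of_nonneg hr0).symm
          · exact (Int.toNat_of_nonneg hc0).symm
      set cur0 := (grid.getD r.toNat []).getD c.toNat (0:Int) with hcur0
      by_cases hbr : cur0 = 0 ∨ n < cur0
      · rw [if_pos hbr]
        have hlen' : (grid.modify r.toNat (fun row => row.set c.toNat n)).length = size.toNat := by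
          rw [List.length_modify]; exact hlen
        have hrow' : ∀ i, i < size.toNat →
            ((grid.modify r.toNat (fun row => row.set c.toNat n)).getD i []).length = size.toNat := by
          intro i hi
          rw [getD_modify]
          split_ifs with hcond
          · rw [List.length_set]; exact hrow i hi
          · exact hrow i hi
        obtain ⟨a, b, cc⟩ := ih _ hlen' hrow'
        refine ⟨a, b, ?_⟩
        intro i j hi hj
        rw [cc i j hi hj, List.foldl_cons]
        congr 1
        have hcell : pvCell (grid.modify r.toNat (fun row => row.set c.toNat n)) i j =
            if r.toNat = i ∧ c.toNat = j then n else pvCell grid i j := by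
          unfold pvCell
          rw [getD_modify]
          by_cases hri : r.toNat = i
          · subst hri
            rw [if_pos ⟨rfl, by rw [hlen]; exact hi⟩, getD_set]
            by_cases hcj : c.toNat = j
            · subst hcj
              rw [if_pos ⟨rfl, by rw [hrow _ hi]; exact hj⟩, if_pos ⟨rfl, rfl⟩]
            · rw [if_neg (by tauto), if_neg (by tauto)]
          · rw [if_neg (by tauto), if_neg (by tauto)]
        rw [hcell]
        unfold pvCellStep
        rw [hh, Option.elim_some]
        dsimp only
        by_cases hij : r.toNat = i ∧ c.toNat = j
        · rw [if_pos hij, if_pos ((hiff i j).mpr hij)]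
          obtain ⟨hri, hcj⟩ := hij
          rw [← hri, ← hcj, show pvCell grid r.toNat c.toNat = cur0 from rfl, if_pos hbr]
        · rw [if_neg hij, if_neg (fun hcon => hij ((hiff i j).mp hcon))]
      · rw [if_neg hbr]
        obtain ⟨a, b, cc⟩ := ih grid hlen hrow
        refine ⟨a, b, ?_⟩
        intro i j hi hj
        rw [cc i j hi hj, List.foldl_cons]
        congr 1
        unfold pvCellStep
        rw [hh, Option.elim_some]
        dsimp only
        by_cases hij : r = Int.ofNat i ∧ c = Int.ofNat j
        · rw [if_pos hij]
          obtain ⟨hri, hcj⟩ := (hiff i j).mp hij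
          rw [← hri, ← hcj, show pvCell grid r.toNat c.toNat = cur0 from rfl, if_neg hbr]
        · rw [if_neg hij]

-- ---------- dict-style lookup against membership, under distinct keys ----------

theorem pvLook_mem {sol : List (String × Bool)} (hnd : (sol.map Prod.fst).Nodup) (k : String) :
    pvLook sol k = true ↔ (k, true) ∈ sol := by
  induction sol with
  | nil => simp [pvLook]
  | cons p t ih =>
    obtain ⟨k', v'⟩ := p
    simp only [List.map_cons, List.nodup_cons] at hnd
    obtain ⟨hk', hndt⟩ := hnd
    by_cases hk : k' = k
    · subst hk
      have : pvLook ((k', v') :: t) k' = v' := by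
        unfold pvLook
        rw [List.find?_cons_of_pos (by simp)]
      rw [this]
      constructor
      · intro hv; rw [← hv]; exact List.mem_cons_self
      · intro hm
        rcases List.mem_cons.mp hm with he | hm
        · injection he with _ hv; exact hv.symm
        · exact absurd (List.mem_map_of_mem (f := Prod.fst) hm) hk'
    · have : pvLook ((k', v') :: t) k = pvLook t k := by
        unfold pvLook
        rw [List.find?_cons_of_neg (by simp [hk])]
      rw [this, ih hndt]
      constructor
      · exact fun hm => List.mem_cons_of_mem _ hm
      · intro hm
        rcases List.mem_cons.mp hm with he | hm
        · exact absurd (congrArg Prod.fst he).symm hk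
        · exact hm

-- ---------- first hit of an ascending range = minimum of the hit set ----------

theorem find?_eq_head?_filter {α : Type} (p : α → Bool) : ∀ l : List α, l.find? p = (l.filter p).head? := by
  intro l
  induction l with
  | nil => rfl
  | cons a t ih =>
    by_cases hp : p a
    · rw [List.find?_cons_of_pos hp, List.filter_cons_of_pos hp]
      rfl
    · rw [List.find?_cons_of_neg (by simpa using hp), List.filter_cons_of_neg (by simpa using hp), ih]

def pvHitAt (size r c : Int) (kv : String × Bool) : Option Int :=
  (pvHit size kv).bind (fun rcn => if rcn.1 = r ∧ rcn.2.1 = c then some rcn.2.2 else none)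

def pvHits (size : Int) (sol : List (String × Bool)) (r c : Int) : List Int :=
  sol.filterMap (pvHitAt size r c)

theorem pvHits_cons_none {size : Int} {kv : String × Bool} {t : List (String × Bool)} {r c : Int}
    (hh : pvHit size kv = none) : pvHits size (kv :: t) r c = pvHits size t r c := by
  unfold pvHits
  rw [List.filterMap_cons]
  have : pvHitAt size r c kv = none := by unfold pvHitAt; rw [hh]; rfl
  rw [this]

theorem pvHits_cons_some {size : Int} {kv : String × Bool} {t : List (String × Bool)} {r c r' c' n : Int}
    (hh : pvHit size kv = some (r', c', n)) :
    pvHits size (kv :: t) r c =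
      if r' = r ∧ c' = c then n :: pvHits size t r c else pvHits size t r c := by
  unfold pvHits
  rw [List.filterMap_cons]
  have hat : pvHitAt size r c kv = if r' = r ∧ c' = c then some n else none := by
    unfold pvHitAt
    rw [hh, Option.bind_some]
  rw [hat]
  split_ifs <;> rfl

theorem foldl_cellstep_eq (size r c : Int) :
    ∀ (sol : List (String × Bool)) (cur : Int),
      sol.foldl (pvCellStep size r c) cur =
        (pvHits size sol r c).foldl (fun cur x => if cur = 0 ∨ x < cur then x else cur) cur := by
  intro sol
  induction sol with
  | nil => intro cur; rfl
  | cons kv t ih =>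
    intro cur
    rw [List.foldl_cons]
    cases hh : pvHit size kv with
    | none =>
      rw [pvHits_cons_none hh,
          show pvCellStep size r c cur kv = cur by unfold pvCellStep; rw [hh]; rfl, ih]
    | some rcn =>
      obtain ⟨r', c', n⟩ := rcn
      by_cases hij : r' = r ∧ c' = c
      · rw [pvHits_cons_some hh, if_pos hij, List.foldl_cons,
            show pvCellStep size r c cur kv = (if cur = 0 ∨ n < cur then n else cur) by
              unfold pvCellStep; rw [hh, Option.elim_some]; dsimp only; rw [if_pos hij], ih]
      · rw [pvHits_cons_some hh, if_neg hij,
            show pvCellStep size r c cur kv = cur by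
              unfold pvCellStep; rw [hh, Option.elim_some]; dsimp only; rw [if_neg hij], ih]

theorem mem_pvHits {size : Int} {sol : List (String × Bool)} {r c : Int}
    (hnd : (sol.map Prod.fst).Nodup)
    (hr : r ∈ PySem.List.pyRange 0 size) (hc : c ∈ PySem.List.pyRange 0 size) (n' : Int) :
    n' ∈ pvHits size sol r c ↔
      (n' ∈ PySem.List.pyRange 1 (size + 1) ∧ pvLook sol (pvKey r c n') = true) := by
  unfold pvHits
  rw [List.mem_filterMap]
  constructor
  · rintro ⟨kv, hkv, hf⟩
    unfold pvHitAt at hf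
    cases hh : pvHit size kv with
    | none => rw [hh] at hf; simp at hf
    | some rcn =>
      obtain ⟨r'', c'', n''⟩ := rcn
      rw [hh, Option.bind_some] at hf
      by_cases hij : r'' = r ∧ c'' = c
      · rw [if_pos hij] at hf
        simp only [Option.some.injEq] at hf
        obtain ⟨hr'', hc''⟩ := hij
        rw [hr'', hc'', hf] at hh
        obtain ⟨hv, _, _, hnm⟩ := pvHit_ranges hh
        refine ⟨hnm, ?_⟩
        have hkv' : kv = (pvKey r c n', true) := (pvHit_iff hr hc hnm).mp hh
        rw [pvLook_mem hnd (pvKey r c n')]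
        rw [hkv'] at hkv
        exact hkv
      · rw [if_neg hij] at hf; simp at hf
  · rintro ⟨hnm, hlook⟩
    refine ⟨(pvKey r c n', true), (pvLook_mem hnd (pvKey r c n')).mp hlook, ?_⟩
    unfold pvHitAt
    rw [(pvHit_iff hr hc hnm).mpr rfl, Option.bind_some]
    simp

theorem pvMin_stay : ∀ (ns : List Int) (cur : Int), (∀ x ∈ ns, cur ≤ x) → cur ≠ 0 →
    ns.foldl (fun cur x => if cur = 0 ∨ x < cur then x else cur) cur = cur := by
  intro ns
  induction ns with
  | nil => intro cur _ _; rfl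
  | cons x t ih =>
    intro cur hall h0
    rw [List.foldl_cons, if_neg (by push_neg; exact ⟨h0, hall x List.mem_cons_self⟩)]
    exact ih cur (fun y hy => hall y (List.mem_cons_of_mem _ hy)) h0

theorem pvMin_min (m : Int) (hm1 : 1 ≤ m) :
    ∀ (ns : List Int) (cur : Int), m ∈ ns → (∀ x ∈ ns, m ≤ x ∧ 1 ≤ x) →
      (cur = 0 ∨ (m ≤ cur ∧ 1 ≤ cur)) →
      ns.foldl (fun cur x => if cur = 0 ∨ x < cur then x else cur) cur = m := by
  intro ns
  induction ns with
  | nil => intro cur hmem; simp at hmem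
  | cons x t ih =>
    intro cur hmem hall hcur
    rw [List.foldl_cons]
    by_cases hx : m ∈ t
    · apply ih _ hx (fun y hy => hall y (List.mem_cons_of_mem _ hy))
      obtain ⟨hmx, h1x⟩ := hall x List.mem_cons_self
      by_cases hc : cur = 0 ∨ x < cur
      · rw [if_pos hc]; right; exact ⟨hmx, h1x⟩
      · rw [if_neg hc]
        push_neg at hc
        rcases hcur with h | h
        · exact absurd h hc.1
        · right; exact h
    · have hxm : x = m := by
        rcases List.mem_cons.mp hmem with h | h
        · exact h.symm
        · exact absurd h hx
      subst hxm
      have hstep : (if cur = 0 ∨ x < cur then x else cur) = x := by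
        by_cases hc : cur = 0 ∨ x < cur
        · rw [if_pos hc]
        · rw [if_neg hc]
          push_neg at hc
          rcases hcur with h | h
          · exact absurd h hc.1
          · omega
      rw [hstep]
      exact pvMin_stay t x (fun y hy => (hall y (List.mem_cons_of_mem _ hy)).1) (by omega)

theorem cell_to_aCell {size : Int} {sol : List (String × Bool)}
    (hnd : (sol.map Prod.fst).Nodup) {r c : Int}
    (hr : r ∈ PySem.List.pyRange 0 size) (hc : c ∈ PySem.List.pyRange 0 size) :
    sol.foldl (pvCellStep size r c) 0 = aCell sol size r c := by
  rw [foldl_cellstep_eq]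
  unfold aCell
  rw [find?_eq_head?_filter]
  set p := fun n => pvLook sol (pvKey r c n) with hp
  set F := (PySem.List.pyRange 1 (size + 1)).filter p with hF
  have hmem : ∀ n', n' ∈ pvHits size sol r c ↔ n' ∈ F := by
    intro n'
    rw [mem_pvHits hnd hr hc n', hF, List.mem_filter]
  cases hhead : F.head? with
  | none =>
    have hFnil : F = [] := List.head?_eq_none_iff.mp hhead
    have : pvHits size sol r c = [] := by
      apply List.eq_nil_iff_forall_not_mem.mpr
      intro x hx
      rw [hmem x, hFnil] at hx
      simp at hx
    rw [this]
    rfl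
  | some m =>
    obtain ⟨tl, hFtl⟩ : ∃ tl, F = m :: tl := by
      cases hF' : F with
      | nil => rw [hF'] at hhead; simp at hhead
      | cons a tl =>
        rw [hF'] at hhead
        simp only [List.head?_cons, Option.some.injEq] at hhead
        exact ⟨tl, by rw [hhead]⟩
    have hpw : F.Pairwise (· < ·) := List.Pairwise.filter _ (PySem.List.pairwise_lt_pyRange_one 1 (size + 1))
    have hmin : ∀ x ∈ F, m ≤ x := by
      intro x hx
      rw [hFtl] at hx hpw
      rcases List.mem_cons.mp hx with h | h
      · omega
      · exact le_of_lt ((List.pairwise_cons.mp hpw).1 x h)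
    have hone : ∀ x ∈ F, 1 ≤ x := by
      intro x hx
      have : x ∈ PySem.List.pyRange 1 (size + 1) := (List.mem_filter.mp (hF ▸ hx)).1
      exact (PySem.List.mem_pyRange_one.mp this).1
    have hmF : m ∈ F := by rw [hFtl]; exact List.mem_cons_self
    exact pvMin_min m (hone m hmF) (pvHits size sol r c) 0 ((hmem m).mpr hmF)
      (fun x hx => ⟨hmin x ((hmem x).mp hx), hone x ((hmem x).mp hx)⟩) (Or.inl rfl)

-- ===== VERDICT (by name: the statement is the Claim_ definition above) =====
theorem decode_sudoku_spec : Claim_equal_decode_sudoku := by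
  unfold Claim_equal_decode_sudoku
  intro solution size hdom hpre
  unfold Spec_decode_sudoku
  rw [A_shape]
  unfold decode_sudoku_alt
  have hpre' : (solution.map Prod.fst).Nodup := hpre
  have hpr : ((PySem.List.pyRange 0 size) : List Int).length = size.toNat := by
    rw [PySem.List.length_pyRange_one]
    omega
  have hlen0 : ((PySem.List.pyRange 0 size).map (fun _ => List.replicate size.toNat (0:Int))).length = size.toNat := by
    rw [List.length_map, hpr]
  have hrow0 : ∀ i, i < size.toNat →
      (((PySem.List.pyRange 0 size).map (fun _ => List.replicate size.toNat (0:Int))).getD i []).length = size.toNat := by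
    intro i hi
    rw [getD_map _ _ _ (by rw [hpr]; exact hi)]
    exact List.length_replicate
  obtain ⟨hL, hRow, hCell⟩ := B_fold size solution _ hlen0 hrow0
  apply List.ext_getElem
  · rw [hL, List.length_map, List.length_range]
  · intro i h1 h2
    have hi : i < size.toNat := by simpa using h1
    rw [List.getElem_map, List.getElem_range]
    apply List.ext_getElem
    · have hrl := hRow i hi
      rw [List.getD_eq_getElem _ _ h2] at hrl
      rw [List.length_map, List.length_range, hrl]
    · intro j h3 h4
      have hj : j < size.toNat := by simpa using h3
      rw [List.getElem_map, List.getElem_range]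
      have hcell := hCell i j hi hj
      have hc1 : pvCell (List.foldl (pvStep (pvTable (PySem.List.pyRange 0 size)) (pvTable (PySem.List.pyRange 1 (size + 1)))) ((PySem.List.pyRange 0 size).map (fun _ => List.replicate size.toNat (0:Int))) solution) i j =
          (List.foldl (pvStep (pvTable (PySem.List.pyRange 0 size)) (pvTable (PySem.List.pyRange 1 (size + 1)))) ((PySem.List.pyRange 0 size).map (fun _ => List.replicate size.toNat (0:Int))) solution)[i][j] := by
        unfold pvCell
        rw [List.getD_eq_getElem _ _ h2, List.getD_eq_getElem _ _ h4]
      have hc0 : pvCell ((PySem.List.pyRange 0 size).map (fun _ => List.replicate size.toNat (0:Int))) i j = 0 := by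
        unfold pvCell
        rw [getD_map _ _ _ (by rw [hpr]; exact hi)]
        exact getD_replicate_zero _ _
      rw [hc1, hc0] at hcell
      have hrmem : Int.ofNat i ∈ PySem.List.pyRange 0 size := by
        rw [PySem.List.mem_pyRange_one]
        have h5 : (0:Int) ≤ (i:Int) ∧ (i:Int) < size := by omega
        exact h5
      have hcmem : Int.ofNat j ∈ PySem.List.pyRange 0 size := by
        rw [PySem.List.mem_pyRange_one]
        have h5 : (0:Int) ≤ (j:Int) ∧ (j:Int) < size := by omega
        exact h5
      rw [cell_to_aCell hpre' hrmem hcmem] at hcell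
      exact hcell.symm
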